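-- pv_equiv track=rewrite | github.com/Jassandip/Byte | Course_Work/Phase1/W1/W1_D1/4-sum_of_divisors/wtf.py | get_totatives
-- ===== SOURCE A (Python) =====
-- def compute_divisors(num):
--     divisors =[]
--     for i in range(1,num+1):
--         if num % i == 0:
--             divisors.append(i)
--         else:
--             pass
--     return divisors
--
-- def get_totatives(num):
--     totatives =[]
--     if num >= 1:
--         totatives.append(1)
--     else:
--         pass
--     a = list(range(2,num))
--     for i in range(2,num):
--         for j in range(2,i):
--             if i % j == 0:
--                 a.remove(i)
--                 break
--             else:
--                 pass
--     totatives = totatives + a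
--
--     x = compute_divisors(num)
--
--     for i in x:
--         for j in totatives:
--             if i == j:
--                 totatives.remove(j)
--             else:
--                 pass
--     return(totatives)
-- ===== SOURCE B (Python) =====
-- def get_totatives(num):
--     def is_prime(k):
--         j = 2
--         while j * j <= k:
--             if k % j == 0:
--                 return False
--             j += 1
--         return k >= 2
--
--     return [p for p in range(2, num) if is_prime(p) and num % p != 0]
-- ===== Notes on version B (the rewrite author's own statement) =====
-- stated objective: faster
-- what changed: Replaces A's build-then-remove passes (trial division by every j < i on a list pruned with list.remove, then a nested divisor-removal scan) by a single filtered pass over range(2,num) using sqrt-bounded trial division and a direct num % p test.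
import Mathlib
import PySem

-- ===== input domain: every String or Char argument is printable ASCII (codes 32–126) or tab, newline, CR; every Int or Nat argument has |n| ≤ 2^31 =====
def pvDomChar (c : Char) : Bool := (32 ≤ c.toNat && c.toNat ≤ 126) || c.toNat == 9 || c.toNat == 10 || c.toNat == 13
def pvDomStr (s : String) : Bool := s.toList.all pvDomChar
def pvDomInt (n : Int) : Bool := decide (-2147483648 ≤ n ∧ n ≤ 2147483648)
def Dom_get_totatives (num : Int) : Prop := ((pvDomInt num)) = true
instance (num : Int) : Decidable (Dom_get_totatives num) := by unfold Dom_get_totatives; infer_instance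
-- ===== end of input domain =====

-- B replaces A's build-then-remove passes (trial division by every j < i, then a quadratic
-- divisor-removal scan) by a single filtered pass with √p-bounded trial division: alternative, simpler.

-- ===== PORT A =====
def compute_divisors (num : Int) : List Int :=
  (PySem.List.pyRange 1 (num + 1) 1).foldl
    (fun divisors i => if PySem.Int.mod num i == 0 then divisors ++ [i] else divisors) []

def get_totatives (num : Int) : List Int :=
  let totatives : List Int := if num ≥ 1 then [1] else []
  let a := PySem.List.pyRange 2 num 1
  -- the inner 'for j in range(2,i): … break' loop is a short-circuit scan = List.any;
  -- a.remove(i) never raises here (i is still in a), so remove?.getD is exact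
  let a := (PySem.List.pyRange 2 num 1).foldl
    (fun a i =>
      if (PySem.List.pyRange 2 i 1).any (fun j => PySem.Int.mod i j == 0)
      then (PySem.List.remove? a i).getD a else a) a
  let totatives := totatives ++ a
  let x := compute_divisors num
  -- Python's inner scan removes the first match of i (if any); totatives is duplicate-free, so
  -- the element the mutate-during-iteration skips is never another match: effect = remove? (no-op if absent)
  x.foldl (fun t i => (PySem.List.remove? t i).getD t) totatives

-- ===== PORT B =====
-- the 'while j * j <= k' trial-division loop of Source B's is_prime
def bTrial (k : Int) (j : Int) : Bool :=
  if h : j * j ≤ k then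
    if PySem.Int.mod k j == 0 then false else bTrial k (j + 1)
  else decide (k ≥ 2)
termination_by (k + 1 - j).toNat
decreasing_by
  have hj : j ≤ k := by nlinarith [sq_nonneg j, sq_nonneg (j - 1)]
  omega

def get_totatives_alt (num : Int) : List Int :=
  (PySem.List.pyRange 2 num 1).filter
    (fun p => bTrial p 2 && PySem.Int.mod num p != 0)

-- ===== PRECONDITION & SPEC =====
def Spec_get_totatives (num : Int) (out : List Int) : Prop := out = get_totatives_alt num
instance (num : Int) (out : List Int) : Decidable (Spec_get_totatives num out) := by unfold Spec_get_totatives; infer_instance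

-- ===== CLAIM (what is proved, stated in full; the proofs are below) =====
def Claim_equal_get_totatives : Prop := ∀ (num : Int), Dom_get_totatives num → Spec_get_totatives num (get_totatives num)

-- ===== LEMMAS AND PROOFS =====

-- removing (the unique occurrence of) i from a duplicate-free list is a filter
theorem removeGetD_eq_filter (t : List Int) (i : Int) (h : t.Nodup) :
    (PySem.List.remove? t i).getD t = t.filter (fun x => x != i) := by
  by_cases hi : i ∈ t
  · rw [PySem.List.remove?_eq_some_erase t i hi, Option.getD_some, h.erase_eq_filter]
  · rw [(PySem.List.remove?_eq_none_iff t i).2 hi, Option.getD_none]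
    exact (List.filter_eq_self.2 (fun x hx => by simp; rintro rfl; exact hi hx)).symm

-- A's divisor-removal pass: folding remove? over xs on a duplicate-free list filters xs out
theorem foldl_remove_eq_filter (xs : List Int) :
    ∀ (t : List Int), t.Nodup →
      xs.foldl (fun t i => (PySem.List.remove? t i).getD t) t
        = t.filter (fun x => decide (x ∉ xs)) := by
  induction xs with
  | nil => intro t _; simp
  | cons i xs ih =>
    intro t ht
    have h1 : (PySem.List.remove? t i).getD t = t.filter (fun x => x != i) :=
      removeGetD_eq_filter t i ht
    simp only [List.foldl_cons, h1, ih _ (ht.filter _), List.filter_filter]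
    refine List.filter_congr (fun x _ => ?_)
    by_cases hxi : x = i <;> simp [hxi]

-- A's composite-removal pass: conditional remove? starting from the scanned list itself
theorem foldl_condremove_eq_filter (P : Int → Bool) (l : List Int) :
    ∀ (t : List Int), t.Nodup →
      l.foldl (fun a i => if P i then (PySem.List.remove? a i).getD a else a) t
        = t.filter (fun x => !(P x && decide (x ∈ l))) := by
  induction l with
  | nil => intro t _; simp
  | cons i l ih =>
    intro t ht
    by_cases hp : P i
    · have h1 : (PySem.List.remove? t i).getD t = t.filter (fun x => x != i) :=
        removeGetD_eq_filter t i ht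
      simp only [List.foldl_cons, hp, if_true, h1, ih _ (ht.filter _), List.filter_filter]
      refine List.filter_congr (fun x _ => ?_)
      by_cases hxi : x = i <;> simp [hxi, hp]
    · have hp' : P i = false := by simpa using hp
      simp only [List.foldl_cons, hp', Bool.false_eq_true, if_false, ih _ ht]
      refine List.filter_congr (fun x _ => ?_)
      by_cases hxi : x = i <;> simp [hxi, hp']

theorem compute_divisors_eq_filter (num : Int) :
    compute_divisors num
      = (PySem.List.pyRange 1 (num + 1) 1).filter (fun i => PySem.Int.mod num i == 0) := by
  unfold compute_divisors
  rw [PySem.List.foldl_append_if_eq_filter]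
  simp

-- Int trial divisibility over [2, p) (A's test) characterises primality of p.toNat
theorem noSmallDiv_iff_prime (p : Int) (hp : 2 ≤ p) :
    (∀ j : Int, 2 ≤ j → j < p → PySem.Int.mod p j ≠ 0) ↔ p.toNat.Prime := by
  rw [Nat.prime_def_lt']
  constructor
  · intro h
    refine ⟨by omega, fun m hm hmp hdvd => ?_⟩
    refine h (m : Int) (by exact_mod_cast hm) (by omega) ?_
    rw [PySem.Int.mod_eq_zero_iff_dvd]
    have : ((m : Int)) ∣ ((p.toNat : Nat) : Int) := Int.natCast_dvd_natCast.2 hdvd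
    rwa [Int.toNat_of_nonneg (by omega)] at this
  · rintro ⟨-, h⟩ j h2 hjp hmod
    rw [PySem.Int.mod_eq_zero_iff_dvd] at hmod
    refine h j.toNat (by omega) (by omega) (Int.natCast_dvd_natCast.1 ?_)
    rwa [Int.toNat_of_nonneg (by omega), Int.toNat_of_nonneg (by omega)]

-- bTrial unrolled: no divisor m ≥ j with m*m ≤ k
theorem bTrial_iff (k : Int) : ∀ j : Int, 1 ≤ j →
    (bTrial k j = true ↔ (2 ≤ k ∧ ∀ m : Int, j ≤ m → m * m ≤ k → PySem.Int.mod k m ≠ 0)) := by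
  intro j
  induction j using bTrial.induct k with
  | case1 j h hmod =>
    intro _
    rw [bTrial, dif_pos h, if_pos hmod]
    refine iff_of_false (by simp) ?_
    rintro ⟨-, hall⟩
    exact hall j le_rfl h (by simpa using hmod)
  | case2 j h hmod ih =>
    intro hj
    rw [bTrial, dif_pos h, if_neg hmod, ih (by omega)]
    constructor
    · rintro ⟨h2, hall⟩
      refine ⟨h2, fun m hjm hmk => ?_⟩
      rcases eq_or_lt_of_le hjm with rfl | hlt
      · simpa using hmod
      · exact hall m (by omega) hmk
    · rintro ⟨h2, hall⟩
      exact ⟨h2, fun m hjm hmk => hall m (by omega) hmk⟩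
  | case3 j h =>
    intro hj
    rw [bTrial, dif_neg h]
    simp only [decide_eq_true_eq, ge_iff_le]
    constructor
    · intro h2
      refine ⟨h2, fun m hjm hmk => ?_⟩
      have hm2 : j * j ≤ m * m := mul_le_mul hjm hjm (by omega) (by omega)
      omega
    · rintro ⟨h2, -⟩; exact h2

-- B's test characterises primality of p.toNat (for 2 ≤ p)
theorem bTrial_iff_prime (p : Int) (hp : 2 ≤ p) :
    bTrial p 2 = true ↔ p.toNat.Prime := by
  rw [bTrial_iff p 2 (by omega), Nat.prime_def_le_sqrt]
  constructor
  · rintro ⟨-, h⟩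
    refine ⟨by omega, fun m hm hms hdvd => ?_⟩
    rw [Nat.le_sqrt] at hms
    have hms' : ((m * m : ℕ) : ℤ) ≤ ((p.toNat : ℕ) : ℤ) := by exact_mod_cast hms
    rw [Int.toNat_of_nonneg (by omega)] at hms'
    refine h (m : Int) (by exact_mod_cast hm) (by push_cast at hms' ⊢; omega) ?_
    rw [PySem.Int.mod_eq_zero_iff_dvd]
    have : ((m : Int)) ∣ ((p.toNat : Nat) : Int) := Int.natCast_dvd_natCast.2 hdvd
    rwa [Int.toNat_of_nonneg (by omega)] at this
  · rintro ⟨-, h⟩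
    refine ⟨hp, fun m h2m hmk hmod => ?_⟩
    rw [PySem.Int.mod_eq_zero_iff_dvd] at hmod
    have hmm : (m.toNat : ℤ) * (m.toNat : ℤ) = m * m := by
      rw [Int.toNat_of_nonneg (by omega)]
    refine h m.toNat (by omega) (Nat.le_sqrt.2 ?_) (Int.natCast_dvd_natCast.1 ?_)
    · have : ((m.toNat * m.toNat : ℕ) : ℤ) ≤ ((p.toNat : ℕ) : ℤ) := by
        push_cast
        rw [Int.toNat_of_nonneg (by omega)]
        omega
      exact_mod_cast this
    · rwa [Int.toNat_of_nonneg (by omega), Int.toNat_of_nonneg (by omega)]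

-- A's short-circuit composite test agrees with B's √-bounded one, on any p in range(2, num)
theorem tests_agree (p : Int) (hp : 2 ≤ p) :
    (!(PySem.List.pyRange 2 p 1).any (fun j => PySem.Int.mod p j == 0)) = bTrial p 2 := by
  have hA : (PySem.List.pyRange 2 p 1).any (fun j => PySem.Int.mod p j == 0) = false
      ↔ (∀ j : Int, 2 ≤ j → j < p → PySem.Int.mod p j ≠ 0) := by
    rw [List.any_eq_false]
    constructor
    · intro h j h2 hjp
      have := h j (PySem.List.mem_pyRange_one.2 ⟨h2, hjp⟩)
      simpa using this
    · intro h j hj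
      rcases PySem.List.mem_pyRange_one.1 hj with ⟨h2, hjp⟩
      simpa using h j h2 hjp
  by_cases hb : bTrial p 2 = true
  · rw [hb, Bool.not_eq_true', hA, noSmallDiv_iff_prime p hp]
    exact (bTrial_iff_prime p hp).1 hb
  · rw [Bool.not_eq_true] at hb
    rw [hb]
    simp only [Bool.not_eq_false']
    by_contra hfalse
    rw [Bool.not_eq_true, hA, noSmallDiv_iff_prime p hp] at hfalse
    exact absurd ((bTrial_iff_prime p hp).2 hfalse) (by simp [hb])

theorem mem_compute_divisors (num i : Int) :
    i ∈ compute_divisors num ↔ (1 ≤ i ∧ i < num + 1 ∧ PySem.Int.mod num i = 0) := by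
  rw [compute_divisors_eq_filter, List.mem_filter, PySem.List.mem_pyRange_one]
  simp [and_assoc]

-- ===== VERDICT (by name: the statement is the Claim_ definition above) =====
theorem get_totatives_spec : Claim_equal_get_totatives := by
  intro num _
  simp only [Spec_get_totatives, get_totatives, get_totatives_alt]
  set R := PySem.List.pyRange 2 num 1 with hR
  have hRnodup : R.Nodup := PySem.List.nodup_pyRange_one 2 num
  have hmemR : ∀ x, x ∈ R ↔ 2 ≤ x ∧ x < num := fun x => PySem.List.mem_pyRange_one
  -- composite-removal pass
  rw [foldl_condremove_eq_filter _ R R hRnodup]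
  set P := fun i => (PySem.List.pyRange 2 i 1).any (fun j => PySem.Int.mod i j == 0) with hP
  have hprimes : R.filter (fun x => !(P x && decide (x ∈ R))) = R.filter (fun x => !P x) := by
    refine List.filter_congr (fun x hx => by simp [hx])
  rw [hprimes]
  -- divisor-removal pass
  have hnodup2 : ((if num ≥ 1 then [(1:Int)] else []) ++ R.filter (fun x => !P x)).Nodup := by
    refine List.Nodup.append ?_ (hRnodup.filter _) ?_
    · split_ifs <;> simp
    · intro x hx hx2
      have : x = 1 := by split_ifs at hx <;> simp_all
      have := (hmemR x).1 (List.mem_of_mem_filter hx2)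
      omega
  rw [foldl_remove_eq_filter _ _ hnodup2, List.filter_append]
  -- the leading 1 (present iff num ≥ 1) is always a divisor, hence always dropped
  have hhead : ((if num ≥ 1 then [(1:Int)] else []).filter
      (fun x => decide (x ∉ compute_divisors num))) = [] := by
    split_ifs with h1
    · simp only [List.filter_cons, List.filter_nil]
      rw [if_neg]
      simp only [decide_eq_true_eq, not_not]
      exact (mem_compute_divisors num 1).2
        ⟨le_refl 1, by omega, (PySem.Int.mod_eq_zero_iff_dvd num 1).2 (one_dvd num)⟩
    · simp
  rw [hhead, List.nil_append, List.filter_filter]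
  refine List.filter_congr (fun x hx => ?_)
  rcases (hmemR x).1 hx with ⟨h2, hxn⟩
  have ht := tests_agree x h2
  have hd : (decide (x ∉ compute_divisors num)) = (PySem.Int.mod num x != 0) := by
    by_cases hm : PySem.Int.mod num x = 0
    · have hin : x ∈ compute_divisors num :=
        (mem_compute_divisors num x).2 ⟨by omega, by omega, hm⟩
      simp [hin, hm]
    · have hout : x ∉ compute_divisors num :=
        fun hmem => hm ((mem_compute_divisors num x).1 hmem).2.2
      simp [hout, hm]
  rw [hd, ht, Bool.and_comm]
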